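-- pv_equiv track=rewrite | github.com/zhaiyy-zyy/CS_moodle | Y3-CS/Y3-Spring/AIM/Coursework Materials-20250401/Coursework Materials-20250304/z3.py | optimize_bins
-- ===== SOURCE A (Python) =====
-- def optimize_bins(bins, bin_capacity):
--     """尝试合并箱子，减少数量"""
--     bins.sort(key=lambda x: sum(x), reverse=True)  # **按箱子利用率排序**
--
--     optimized_bins = []
--     for bin_items in bins:
--         placed = False
--         for opt_bin in optimized_bins:
--             if sum(opt_bin) + sum(bin_items) <= bin_capacity:
--                 opt_bin.extend(bin_items)
--                 placed = True
--                 break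
--         if not placed:
--             optimized_bins.append(bin_items)
--
--     return optimized_bins
-- ===== SOURCE B (Python) =====
-- def _max2(a, b):
--     if a is None:
--         return b
--     if b is None:
--         return a
--     return a if a >= b else b
--
--
-- def _top(t):
--     return t[1]
--
--
-- def _build(size):
--     if size == 1:
--         return ('leaf', None)
--     half = size // 2
--     return ('node', None, _build(half), _build(half))
--
--
-- def _set(t, size, i, val):
--     if t[0] == 'leaf':
--         return ('leaf', val)
--     half = size // 2
--     if i < half:
--         l = _set(t[2], half, i, val)
--         r = t[3]
--     else:
--         l = t[2]
--         r = _set(t[3], half, i - half, val)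
--     return ('node', _max2(_top(l), _top(r)), l, r)
--
--
-- def _query(t, size, s):
--     # leftmost leaf holding a value >= s, or None
--     v = _top(t)
--     if v is None or v < s:
--         return None
--     if t[0] == 'leaf':
--         return 0
--     half = size // 2
--     j = _query(t[2], half, s)
--     if j is not None:
--         return j
--     return half + _query(t[3], half, s)
--
--
-- def optimize_bins(bins, bin_capacity):
--     order = sorted(bins, key=sum, reverse=True)
--     size = 1
--     while size < len(order):
--         size *= 2
--     tree = _build(size)        # segment tree of remaining capacities (None = closed slot)
--     rems = []
--     out = []
--     for b in order:
--         s = sum(b)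
--         j = _query(tree, size, s)
--         if j is None:
--             j = len(out)
--             out.append(b)
--             rems.append(bin_capacity - s)
--         else:
--             out[j] = out[j] + b
--             rems[j] = rems[j] - s
--         tree = _set(tree, size, j, rems[j])
--     return out
-- ===== Notes on version B (the rewrite author's own statement) =====
-- stated objective: faster
-- what changed: Replaces A's first-fit inner rescan of every opened bin (recomputing each opened bin's sum by re-summing its items on every probe) with a persistent segment tree of maxima over remaining capacities, queried for the leftmost slot that fits in O(log n) per placement.
import Mathlib
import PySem

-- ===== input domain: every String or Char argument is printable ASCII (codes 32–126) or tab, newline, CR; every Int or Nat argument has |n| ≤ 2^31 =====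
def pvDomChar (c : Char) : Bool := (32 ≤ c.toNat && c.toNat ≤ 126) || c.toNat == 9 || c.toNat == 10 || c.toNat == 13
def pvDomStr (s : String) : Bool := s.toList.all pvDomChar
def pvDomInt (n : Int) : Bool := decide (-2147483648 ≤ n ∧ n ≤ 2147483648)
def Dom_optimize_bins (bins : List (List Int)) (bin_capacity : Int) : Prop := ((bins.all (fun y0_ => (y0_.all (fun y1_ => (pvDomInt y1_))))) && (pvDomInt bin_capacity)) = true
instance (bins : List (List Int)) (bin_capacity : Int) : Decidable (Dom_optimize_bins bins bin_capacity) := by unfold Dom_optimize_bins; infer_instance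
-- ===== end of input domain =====

-- B replaces A's linear rescan of all opened bins (with their sums recomputed each time)
-- by a persistent segment tree over remaining capacities queried for the leftmost fitting slot;
-- objective: faster. A sorts `bins` in place and extends its inner lists; the equivalence
-- proved here is about the RETURN value only (B does not mutate its argument).

-- ===== PORT A =====
-- inner `for opt_bin in optimized_bins: … break` loop of A
def ffdPlace (opt : List (List Int)) (b : List Int) (C : Int) : List (List Int) :=
  match opt with
  | [] => [b]
  | o :: rest => if o.sum + b.sum ≤ C then (o ++ b) :: rest else o :: ffdPlace rest b C

def optimize_bins (bins : List (List Int)) (bin_capacity : Int) : List (List Int) :=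
  (PySem.List.sorted bins (fun x => x.sum) true).foldl
    (fun opt b => ffdPlace opt b bin_capacity) []

-- ===== PORT B =====
inductive SegT where
  | leaf : Option Int → SegT
  | node : Option Int → SegT → SegT → SegT
deriving DecidableEq, Repr

-- _max2
def stMax2 : Option Int → Option Int → Option Int
  | none, b => b
  | a, none => a
  | some a, some b => if a ≥ b then some a else some b

-- _top
def stTop : SegT → Option Int
  | .leaf v => v
  | .node v _ _ => v

-- _build (python tests size == 1; size ≤ 1 is the same test made total for size = 0)
def stBuild (size : Nat) : SegT :=
  if size ≤ 1 then SegT.leaf none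
  else SegT.node none (stBuild (size / 2)) (stBuild (size / 2))
decreasing_by all_goals omega

-- _set (dispatch on the tuple tag t[0])
def stSet : SegT → Nat → Nat → Int → SegT
  | .leaf _, _, _, val => .leaf (some val)
  | .node _ l r, size, i, val =>
    let half := size / 2
    if i < half then
      let l' := stSet l half i val
      .node (stMax2 (stTop l') (stTop r)) l' r
    else
      let r' := stSet r half (i - half) val
      .node (stMax2 (stTop l) (stTop r')) l r'

-- _query (the final `none` is python's unreachable `half + None` branch)
def stQuery : SegT → Nat → Int → Option Nat
  | .leaf v, _, s =>
    match v with
    | none => none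
    | some x => if x < s then none else some 0
  | .node v l r, size, s =>
    match v with
    | none => none
    | some x =>
      if x < s then none
      else
        let half := size / 2
        match stQuery l half s with
        | some j => some j
        | none =>
          match stQuery r half s with
          | some jr => some (half + jr)
          | none => none

-- the `while size < len(order): size *= 2` loop (0 < size is a termination guard only;
-- the loop is entered with size = 1 and size only grows)
def growSize (size n : Nat) : Nat :=
  if h : 0 < size ∧ size < n then growSize (size * 2) n else size
termination_by n - size
decreasing_by omega

-- body of B's `for b in order:` loop; state = (tree, rems, out)
def stStep (C : Int) (size : Nat) (st : SegT × List Int × List (List Int)) (b : List Int) :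
    SegT × List Int × List (List Int) :=
  let s := b.sum
  match stQuery st.1 size s with
  | none =>
    let j := st.2.2.length
    (stSet st.1 size j (C - s), st.2.1 ++ [C - s], st.2.2 ++ [b])
  | some j =>
    let v := st.2.1.getD j 0 - s   -- rems[j] - s (j is always in range when it is returned)
    (stSet st.1 size j v, st.2.1.set j v, st.2.2.set j (st.2.2.getD j [] ++ b))

def optimize_bins_alt (bins : List (List Int)) (bin_capacity : Int) : List (List Int) :=
  let order := PySem.List.sorted bins (fun x => x.sum) true
  let size := growSize 1 order.length
  (order.foldl (stStep bin_capacity size) (stBuild size, [], [])).2.2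

-- ===== PRECONDITION & SPEC =====
def Spec_optimize_bins (bins : List (List Int)) (bin_capacity : Int) (out : List (List Int)) : Prop := out = optimize_bins_alt bins bin_capacity
instance (bins : List (List Int)) (bin_capacity : Int) (out : List (List Int)) : Decidable (Spec_optimize_bins bins bin_capacity out) := by unfold Spec_optimize_bins; infer_instance

-- ===== CLAIM (what is proved, stated in full; the proofs are below) =====
def Claim_equal_optimize_bins : Prop := ∀ (bins : List (List Int)) (bin_capacity : Int), Dom_optimize_bins bins bin_capacity → Spec_optimize_bins bins bin_capacity (optimize_bins bins bin_capacity)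

-- ===== LEMMAS AND PROOFS =====

def stLeaves : SegT → List (Option Int)
  | .leaf v => [v]
  | .node _ l r => stLeaves l ++ stLeaves r

-- well-formed segment tree of (power-of-two) size n
inductive StWf : SegT → Nat → Prop
  | leaf (v : Option Int) : StWf (.leaf v) 1
  | node (m : Option Int) (l r : SegT) (n : Nat) :
      StWf l (n / 2) → StWf r (n / 2) → 2 ≤ n → n = 2 * (n / 2) →
      m = stMax2 (stTop l) (stTop r) → StWf (.node m l r) n

def fitsP (s : Int) (o : Option Int) : Bool := o.elim false (fun x => decide (s ≤ x))

theorem stLeaves_length {t : SegT} {n : Nat} (h : StWf t n) : (stLeaves t).length = n := by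
  induction h with
  | leaf v => rfl
  | node m l r n hl hr h2 he hm ihl ihr => simp [stLeaves, ihl, ihr]; omega

theorem stMax2_dom_left {a b : Option Int} {x : Int} (h : a = some x) :
    ∃ y, stMax2 a b = some y ∧ x ≤ y := by
  subst h; cases b with
  | none => exact ⟨x, rfl, le_refl _⟩
  | some b => simp only [stMax2]; split <;> exact ⟨_, rfl, by omega⟩

theorem stMax2_dom_right {a b : Option Int} {x : Int} (h : b = some x) :
    ∃ y, stMax2 a b = some y ∧ x ≤ y := by
  subst h; cases a with
  | none => exact ⟨x, rfl, le_refl _⟩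
  | some a => simp only [stMax2]; split <;> exact ⟨_, rfl, by omega⟩

theorem stTop_bounds {t : SegT} {n : Nat} (h : StWf t n) :
    ∀ o ∈ stLeaves t, ∀ x, o = some x → ∃ y, stTop t = some y ∧ x ≤ y := by
  induction h with
  | leaf v =>
    intro o ho x hx
    simp [stLeaves] at ho; subst ho; exact ⟨x, hx, le_refl _⟩
  | node m l r n hl hr h2 he hm ihl ihr =>
    intro o ho x hx
    simp only [stLeaves, List.mem_append] at ho
    rcases ho with ho | ho
    · obtain ⟨y, hy, hxy⟩ := ihl o ho x hx
      obtain ⟨z, hz, hyz⟩ := stMax2_dom_left (b := stTop r) hy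
      exact ⟨z, by rw [show stTop (SegT.node m l r) = m from rfl, hm, hz], by omega⟩
    · obtain ⟨y, hy, hxy⟩ := ihr o ho x hx
      obtain ⟨z, hz, hyz⟩ := stMax2_dom_right (a := stTop l) hy
      exact ⟨z, by rw [show stTop (SegT.node m l r) = m from rfl, hm, hz], by omega⟩

theorem stQuery_correct {t : SegT} {n : Nat} (h : StWf t n) (s : Int) :
    stQuery t n s = List.findIdx? (fitsP s) (stLeaves t) := by
  induction h with
  | leaf v =>
    cases v with
    | none => simp [stQuery, stLeaves, List.findIdx?_cons, fitsP]
    | some x =>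
      simp only [stQuery, stLeaves, List.findIdx?_cons, fitsP, Option.elim]
      split_ifs with h1 h2 h2 <;> simp_all <;> omega
  | node m l r n hl hr h2 he hm ihl ihr =>
    have hnone : ∀ (hno : ∀ o ∈ stLeaves (SegT.node m l r), fitsP s o = false),
        List.findIdx? (fitsP s) (stLeaves (SegT.node m l r)) = none := by
      intro hno
      exact List.findIdx?_eq_none_iff.mpr hno
    have hdead : (m = none ∨ ∃ x, m = some x ∧ x < s) →
        List.findIdx? (fitsP s) (stLeaves (SegT.node m l r)) = none := by
      intro hcase
      apply hnone
      intro o ho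
      cases o with
      | none => rfl
      | some x =>
        by_contra hcon
        obtain ⟨y, hy, hxy⟩ := stTop_bounds (StWf.node m l r n hl hr h2 he hm) _ ho x rfl
        simp only [stTop] at hy
        rcases hcase with hc | ⟨z, hz, hzs⟩
        · rw [hc] at hy; simp at hy
        · rw [hz] at hy
          injection hy with hy'
          simp [fitsP] at hcon
          omega
    cases m with
    | none => rw [stQuery, hdead (Or.inl rfl)]
    | some x =>
      by_cases hxs : x < s
      · rw [stQuery]
        simp only [hxs, if_true]
        rw [hdead (Or.inr ⟨x, rfl, hxs⟩)]
      · rw [stQuery]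
        simp only [hxs, if_false]
        rw [show stLeaves (SegT.node (some x) l r) = stLeaves l ++ stLeaves r from rfl,
            List.findIdx?_append, ihl, ihr, stLeaves_length hl]
        cases hql : List.findIdx? (fitsP s) (stLeaves l) with
        | some j => simp [Option.or]
        | none =>
          cases hqr : List.findIdx? (fitsP s) (stLeaves r) with
          | none => simp [Option.or]
          | some jr => simp [Option.or, Nat.add_comm]

theorem stSet_correct {t : SegT} {n : Nat} (h : StWf t n) (i : Nat) (hi : i < n) (v : Int) :
    StWf (stSet t n i v) n ∧ stLeaves (stSet t n i v) = (stLeaves t).set i (some v) := by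
  induction h generalizing i with
  | leaf w =>
    interval_cases i
    exact ⟨StWf.leaf _, rfl⟩
  | node m l r n hl hr h2 he hm ihl ihr =>
    have hll : (stLeaves l).length = n / 2 := stLeaves_length hl
    by_cases hcase : i < n / 2
    · obtain ⟨hwf, hlv⟩ := ihl i hcase
      constructor
      · simp only [stSet, hcase, if_true]
        exact StWf.node _ _ _ _ hwf hr h2 he rfl
      · simp only [stSet, hcase, if_true, stLeaves, hlv, List.set_append]
        rw [if_pos (by omega)]
    · have hi2 : i - n / 2 < n / 2 := by omega
      obtain ⟨hwf, hlv⟩ := ihr (i - n / 2) hi2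
      constructor
      · simp only [stSet, hcase, if_false]
        exact StWf.node _ _ _ _ hl hwf h2 he rfl
      · simp only [stSet, hcase, if_false, stLeaves, hlv, List.set_append]
        rw [if_neg (by omega), hll]

theorem stTop_build (size : Nat) : stTop (stBuild size) = none := by
  rw [stBuild]
  split <;> rfl

theorem stBuild_correct : ∀ (k : Nat),
    StWf (stBuild (2 ^ k)) (2 ^ k) ∧ stLeaves (stBuild (2 ^ k)) = List.replicate (2 ^ k) none := by
  intro k
  induction k with
  | zero =>
    constructor
    · rw [stBuild]; simp only [pow_zero, le_refl, if_true]; exact StWf.leaf none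
    · rw [stBuild]; simp [stLeaves]
  | succ k ih =>
    have h1 : 1 ≤ 2 ^ k := Nat.one_le_two_pow
    have hge : 2 ≤ 2 ^ (k + 1) := by rw [pow_succ]; omega
    have hhalf : 2 ^ (k + 1) / 2 = 2 ^ k := by rw [pow_succ]; omega
    rw [stBuild, if_neg (by omega), hhalf]
    constructor
    · refine StWf.node _ _ _ _ ?_ ?_ hge ?_ ?_
      · rw [hhalf]; exact ih.1
      · rw [hhalf]; exact ih.1
      · rw [hhalf, pow_succ]; ring
      · rw [stTop_build]; rfl
    · show stLeaves (stBuild (2 ^ k)) ++ stLeaves (stBuild (2 ^ k)) = _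
      rw [ih.2, ← List.replicate_add, pow_succ]
      congr 1; ring

theorem growSize_spec : ∀ (fuel size n : Nat), n - size ≤ fuel → 1 ≤ size → (∃ k, size = 2 ^ k) →
    (∃ k, growSize size n = 2 ^ k) ∧ n ≤ growSize size n ∧ size ≤ growSize size n := by
  intro fuel
  induction fuel with
  | zero =>
    intro size n hle h1 hk
    rw [growSize, dif_neg (by omega)]
    exact ⟨hk, by omega, le_refl _⟩
  | succ fuel ih =>
    intro size n hle h1 hk
    rw [growSize]
    by_cases hc : 0 < size ∧ size < n
    · rw [dif_pos hc]
      obtain ⟨k, hk'⟩ := hk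
      obtain ⟨h1', h2', h3'⟩ := ih (size * 2) n (by omega) (by omega) ⟨k + 1, by rw [hk']; ring⟩
      exact ⟨h1', h2', by omega⟩
    · rw [dif_neg hc]
      exact ⟨hk, by omega, le_refl _⟩

-- A's inner loop, characterized by findIdx?
theorem ffdPlace_eq (opt : List (List Int)) (b : List Int) (C : Int) :
    ffdPlace opt b C =
      match List.findIdx? (fun o => decide (o.sum + b.sum ≤ C)) opt with
      | some j => opt.set j (opt.getD j [] ++ b)
      | none => opt ++ [b] := by
  induction opt with
  | nil => rfl
  | cons o rest ih =>
    rw [ffdPlace, List.findIdx?_cons]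
    by_cases hc : o.sum + b.sum ≤ C
    · simp [hc]
    · simp only [hc, decide_false, if_neg, not_false_iff]
      rw [ih]
      cases List.findIdx? (fun o => decide (o.sum + b.sum ≤ C)) rest with
      | none => simp
      | some j => simp

theorem findIdx?_lt_length {α : Type} {p : α → Bool} {l : List α} {j : Nat}
    (h : List.findIdx? p l = some j) : j < l.length :=
  (List.findIdx?_eq_some_iff_findIdx_eq.mp h).1

-- the invariant tying B's state to A's list of opened bins
def StInv (C : Int) (size : Nat) (st : SegT × List Int × List (List Int))
    (opt : List (List Int)) : Prop :=
  st.2.2 = opt ∧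
  st.2.1 = opt.map (fun o => C - o.sum) ∧
  StWf st.1 size ∧
  stLeaves st.1 = opt.map (fun o => some (C - o.sum)) ++ List.replicate (size - opt.length) none ∧
  opt.length ≤ size

theorem query_of_inv {C : Int} {size : Nat} {st : SegT × List Int × List (List Int)}
    {opt : List (List Int)} (h : StInv C size st opt) (b : List Int) :
    stQuery st.1 size b.sum = List.findIdx? (fun o => decide (o.sum + b.sum ≤ C)) opt := by
  obtain ⟨h1, h2, hwf, hlv, hlen⟩ := h
  rw [stQuery_correct hwf, hlv, List.findIdx?_append]
  rw [List.findIdx?_replicate]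
  simp only [fitsP, Option.elim, Bool.false_eq_true, and_false, if_neg, not_false_iff,
    Option.map_none, Option.or_none]
  rw [show (fun o : List Int => some (C - o.sum)) = (fun x : Int => some (C - x)) ∘ (fun o : List Int => o.sum) from rfl]
  rw [← List.map_map (g := fun x : Int => some (C - x)), List.findIdx?_map, List.findIdx?_map]
  congr 1
  funext o
  simp only [Function.comp, fitsP, Option.elim]
  exact decide_eq_decide.mpr (by omega)

theorem step_inv {C : Int} {size : Nat} {st : SegT × List Int × List (List Int)}
    {opt : List (List Int)} (h : StInv C size st opt) (b : List Int)
    (hroom : opt.length < size) :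
    StInv C size (stStep C size st b) (ffdPlace opt b C) := by
  have hq := query_of_inv h b
  obtain ⟨tree, rems, out⟩ := st
  obtain ⟨h1, h2, hwf, hlv, hlen⟩ := h
  simp only at h1 h2 hwf hlv hq
  subst h1 h2
  rw [ffdPlace_eq, stStep]
  simp only at hq ⊢
  rw [hq]
  cases hf : List.findIdx? (fun o => decide (o.sum + b.sum ≤ C)) out with
  | none =>
    obtain ⟨hwf', hlv'⟩ := stSet_correct hwf out.length hroom (C - b.sum)
    refine ⟨rfl, by simp, hwf', ?_, by simp; omega⟩
    simp only
    rw [hlv', hlv, List.set_append, if_neg (by simp)]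
    have hrep : size - out.length = 1 + (size - (out.length + 1)) := by omega
    rw [hrep, List.replicate_add]
    simp
  | some j =>
    have hjlt : j < out.length := findIdx?_lt_length hf
    have hget : (out.map (fun o => C - o.sum)).getD j 0 = C - (out.getD j []).sum := by
      rw [List.getD_eq_getElem?_getD, List.getElem?_map, List.getElem?_eq_getElem hjlt]
      simp [List.getD_eq_getElem?_getD, List.getElem?_eq_getElem hjlt]
    obtain ⟨hwf', hlv'⟩ :=
      stSet_correct hwf j (by omega) ((out.map (fun o => C - o.sum)).getD j 0 - b.sum)
    refine ⟨rfl, ?_, hwf', ?_, by simp; omega⟩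
    · simp only
      rw [hget, List.map_set]
      congr 1
      simp [List.sum_append]
      ring
    · simp only
      rw [hlv', hlv, List.set_append, if_pos (by simp; omega)]
      rw [hget, List.map_set, List.length_set]
      congr 2
      simp [List.sum_append]
      ring

theorem loop_inv (C : Int) (size : Nat) :
    ∀ (l : List (List Int)) (st : SegT × List Int × List (List Int)) (opt : List (List Int)),
      StInv C size st opt → opt.length + l.length ≤ size →
      (l.foldl (stStep C size) st).2.2 = l.foldl (fun o b => ffdPlace o b C) opt := by
  intro l
  induction l with
  | nil => intro st opt h _; exact h.1
  | cons b rest ih =>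
    intro st opt h hroom
    simp only [List.foldl_cons]
    have hstep := step_inv h b (by simp at hroom; omega)
    apply ih _ _ hstep
    have : (ffdPlace opt b C).length ≤ opt.length + 1 := by
      rw [ffdPlace_eq]
      cases hf : List.findIdx? (fun o => decide (o.sum + b.sum ≤ C)) opt <;> simp
    simp at hroom ⊢
    omega

-- ===== VERDICT (by name: the statement is the Claim_ definition above) =====
theorem optimize_bins_spec : Claim_equal_optimize_bins := by
  intro bins C _
  unfold Spec_optimize_bins optimize_bins optimize_bins_alt
  set order := PySem.List.sorted bins (fun x => x.sum) true with horder
  obtain ⟨⟨k, hk⟩, hge, _⟩ :=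
    growSize_spec order.length 1 order.length (by omega) (by omega) ⟨0, rfl⟩
  set size := growSize 1 order.length with hsize
  obtain ⟨hwf, hlv⟩ := stBuild_correct k
  rw [← hk] at hwf hlv
  exact (loop_inv C size order (stBuild size, [], []) []
    ⟨rfl, rfl, hwf, by simpa using hlv, by simp⟩ (by simpa using hge)).symm
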